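-- pv_equiv track=rewrite | github.com/NetSPI/OCInferno | ocinferno/modules/opengraph/utilities/helpers/iam_conditionals.py | merge_rows_by_table
-- ===== SOURCE A (Python) =====
-- def merge_rows_by_table(a: dict[str, list[dict]] | None, b: dict[str, list[dict]] | None) -> dict[str, list[dict]]:
--     out: dict[str, list[dict]] = {}
--     for src in (a or {}, b or {}):
--         if not isinstance(src, dict):
--             continue
--         for tname, rows in src.items():
--             if not tname or not isinstance(rows, list):
--                 continue
--             cur = out.setdefault(tname, [])
--             seen = set()
--             for r in cur:
--                 if isinstance(r, dict):
--                     rid = r.get("id") or r.get("compartment_id")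
--                     if rid:
--                         seen.add(rid)
--             for r in rows:
--                 if not isinstance(r, dict):
--                     continue
--                 rid = r.get("id") or r.get("compartment_id")
--                 if rid and rid in seen:
--                     continue
--                 if rid:
--                     seen.add(rid)
--                 cur.append(r)
--     return out
-- ===== SOURCE B (Python) =====
-- def merge_rows_by_table(a: dict[str, list[dict]] | None, b: dict[str, list[dict]] | None) -> dict[str, list[dict]]:
--     # Phase 1: gather all rows per table name, Phase 2: dedupe each once.
--     out: dict[str, list[dict]] = {}
--     for src in (a or {}, b or {}):
--         if not isinstance(src, dict):
--             continue
--         for tname, rows in src.items():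
--             if not tname or not isinstance(rows, list):
--                 continue
--             out.setdefault(tname, []).extend(rows)
--     return {tname: _dedupe(rows) for tname, rows in out.items()}
--
--
-- def _dedupe(rows: list) -> list:
--     seen = set()
--     kept = []
--     for r in rows:
--         if not isinstance(r, dict):
--             continue
--         rid = r.get("id") or r.get("compartment_id")
--         if rid:
--             if rid in seen:
--                 continue
--             seen.add(rid)
--         kept.append(r)
--     return kept
-- ===== Notes on version B (the rewrite author's own statement) =====
-- stated objective: alternative
-- what changed: A dedupes incrementally, rebuilding a seen-set from the accumulated list at every table occurrence; B first concatenates all rows per table name and then dedupes each table's list in one final pass, never rebuilding seen-sets.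
import Mathlib
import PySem

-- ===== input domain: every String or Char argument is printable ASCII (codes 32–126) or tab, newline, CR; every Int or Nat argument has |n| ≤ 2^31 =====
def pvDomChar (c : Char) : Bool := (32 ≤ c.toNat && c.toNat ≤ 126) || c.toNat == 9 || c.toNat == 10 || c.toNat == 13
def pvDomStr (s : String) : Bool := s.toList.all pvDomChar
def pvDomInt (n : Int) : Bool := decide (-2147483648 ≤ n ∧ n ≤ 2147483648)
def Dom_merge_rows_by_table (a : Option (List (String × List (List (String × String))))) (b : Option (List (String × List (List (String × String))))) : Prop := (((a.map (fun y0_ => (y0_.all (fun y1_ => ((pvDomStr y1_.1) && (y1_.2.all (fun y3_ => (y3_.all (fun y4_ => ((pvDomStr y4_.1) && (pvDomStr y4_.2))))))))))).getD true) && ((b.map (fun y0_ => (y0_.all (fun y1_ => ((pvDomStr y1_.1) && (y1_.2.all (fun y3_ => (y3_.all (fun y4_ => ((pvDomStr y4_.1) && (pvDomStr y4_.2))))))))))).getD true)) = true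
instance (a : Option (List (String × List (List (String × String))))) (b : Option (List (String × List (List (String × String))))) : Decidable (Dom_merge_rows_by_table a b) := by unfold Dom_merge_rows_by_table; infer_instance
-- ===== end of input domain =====

-- B merges by concatenating all rows per table first and deduping each table once at the end,
-- instead of A's incremental dedup that rebuilds a seen-set from the accumulated list at each step
-- (objective: alternative decomposition; return value only — the Pythons mutate nothing observable).

-- rid = r.get("id") or r.get("compartment_id"); a missing key and "" are both falsy, modelled as "".
def pvRid (r : List (String × String)) : String :=
  let x := ((PySem.Dict.mk r).get? "id").getD ""
  if x = "" then ((PySem.Dict.mk r).get? "compartment_id").getD "" else x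

-- ===== PORT A =====
-- the `isinstance` guards of A are always true under the Lean types and are omitted.
-- seen = set(); for r in cur: rid = …; if rid: seen.add(rid)
def pvSeenOf (cur : List (List (String × String))) : PySem.Set String :=
  cur.foldl (fun s r => let rid := pvRid r; if rid ≠ "" then PySem.Set.add s rid else s) PySem.Set.empty

-- the body of A's `for r in rows` loop, acting on (cur, seen)
def pvRowA (p : List (List (String × String)) × PySem.Set String) (r : List (String × String)) :
    List (List (String × String)) × PySem.Set String :=
  let rid := pvRid r
  if rid ≠ "" ∧ PySem.Set.contains p.2 rid then p
  else if rid ≠ "" then (p.1 ++ [r], PySem.Set.add p.2 rid)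
  else (p.1 ++ [r], p.2)

-- the body of A's `for tname, rows in src.items()` loop
def pvTableA (out : PySem.Dict String (List (List (String × String)))) (p : String × List (List (String × String))) :
    PySem.Dict String (List (List (String × String))) :=
  if p.1 = "" then out
  else
    let cur := out.getD p.1 []
    let seen := pvSeenOf cur
    out.insert p.1 (p.2.foldl pvRowA (cur, seen)).1

def merge_rows_by_table (a : Option (List (String × List (List (String × String))))) (b : Option (List (String × List (List (String × String))))) : List (String × List (List (String × String))) :=
  (([a.getD [], b.getD []]).foldl (fun out src => src.foldl pvTableA out) PySem.Dict.empty).items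

-- ===== PORT B =====
-- phase-1 loop body: out.setdefault(tname, []).extend(rows)
def pvTableB (out : PySem.Dict String (List (List (String × String)))) (p : String × List (List (String × String))) :
    PySem.Dict String (List (List (String × String))) :=
  if p.1 = "" then out
  else out.insert p.1 (out.getD p.1 [] ++ p.2)

-- _dedupe: one pass with a local seen set, state (kept, seen)
def pvRowB (p : List (List (String × String)) × PySem.Set String) (r : List (String × String)) :
    List (List (String × String)) × PySem.Set String :=
  let rid := pvRid r
  if rid ≠ "" then
    if PySem.Set.contains p.2 rid then p
    else (p.1 ++ [r], PySem.Set.add p.2 rid)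
  else (p.1 ++ [r], p.2)

def pvDedupe (rows : List (List (String × String))) : List (List (String × String)) :=
  (rows.foldl pvRowB ([], PySem.Set.empty)).1

def merge_rows_by_table_alt (a : Option (List (String × List (List (String × String))))) (b : Option (List (String × List (List (String × String))))) : List (String × List (List (String × String))) :=
  let out := ([a.getD [], b.getD []]).foldl (fun out src => src.foldl pvTableB out) PySem.Dict.empty
  out.items.map (fun p => (p.1, pvDedupe p.2))

-- ===== PRECONDITION & SPEC =====
def Spec_merge_rows_by_table (a : Option (List (String × List (List (String × String))))) (b : Option (List (String × List (List (String × String))))) (out : List (String × List (List (String × String)))) : Prop := out = merge_rows_by_table_alt a b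
instance (a : Option (List (String × List (List (String × String))))) (b : Option (List (String × List (List (String × String))))) (out : List (String × List (List (String × String)))) : Decidable (Spec_merge_rows_by_table a b out) := by unfold Spec_merge_rows_by_table; infer_instance

-- ===== CLAIM (what is proved, stated in full; the proofs are below) =====
def Claim_equal_merge_rows_by_table : Prop := ∀ (a : Option (List (String × List (List (String × String))))) (b : Option (List (String × List (List (String × String))))), Dom_merge_rows_by_table a b → Spec_merge_rows_by_table a b (merge_rows_by_table a b)

-- ===== LEMMAS AND PROOFS =====

-- A's row step and B's dedupe step are the same function (different branch nesting).
theorem pvRowA_eq_pvRowB : pvRowA = pvRowB := by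
  funext p r
  simp only [pvRowA, pvRowB]
  split_ifs with h1 h2 h3 h4 <;> first | rfl | (exfalso; tauto)

-- effect of one more row on the rebuilt seen set
theorem pvSeenOf_append (acc : List (List (String × String))) (r : List (String × String)) :
    pvSeenOf (acc ++ [r]) = if pvRid r = "" then pvSeenOf acc else PySem.Set.add (pvSeenOf acc) (pvRid r) := by
  simp only [pvSeenOf, List.foldl_append, List.foldl_cons, List.foldl_nil]
  by_cases h : pvRid r = "" <;> simp [h]

-- the dedupe fold keeps its seen component equal to pvSeenOf of its kept component
theorem pvRowB_seen (rows : List (List (String × String))) (acc : List (List (String × String))) :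
    rows.foldl pvRowB (acc, pvSeenOf acc) =
      ((rows.foldl pvRowB (acc, pvSeenOf acc)).1, pvSeenOf (rows.foldl pvRowB (acc, pvSeenOf acc)).1) := by
  induction rows generalizing acc with
  | nil => simp
  | cons r rs ih =>
    have hstep : pvRowB (acc, pvSeenOf acc) r =
        ((pvRowB (acc, pvSeenOf acc) r).1, pvSeenOf (pvRowB (acc, pvSeenOf acc) r).1) := by
      simp only [pvRowB]
      split_ifs with h1 h2
      · rfl
      · simp [pvSeenOf_append, h1]
      · have h1' : pvRid r = "" := by simpa using h1
        simp [pvSeenOf_append, h1']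
    simp only [List.foldl_cons]
    rw [hstep]
    have := ih (pvRowB (acc, pvSeenOf acc) r).1
    simpa using this

-- deduping a concatenation = continuing from (deduped prefix, its seen set)
theorem pvDedupe_append (xs ys : List (List (String × String))) :
    pvDedupe (xs ++ ys) = (ys.foldl pvRowB (pvDedupe xs, pvSeenOf (pvDedupe xs))).1 := by
  have hx : List.foldl pvRowB ([], PySem.Set.empty) xs = (pvDedupe xs, pvSeenOf (pvDedupe xs)) :=
    pvRowB_seen xs []
  rw [show pvDedupe (xs ++ ys) = (List.foldl pvRowB ([], PySem.Set.empty) (xs ++ ys)).1 from rfl,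
    List.foldl_append, hx]

-- mapDedup : map pvDedupe over the values of a dict
def pvMapDedup (d : PySem.Dict String (List (List (String × String)))) : PySem.Dict String (List (List (String × String))) :=
  PySem.Dict.mk (d.items.map (fun p => (p.1, pvDedupe p.2)))

theorem pvGet?_mk_map (l : List (String × List (List (String × String)))) (t : String) :
    (PySem.Dict.mk (l.map (fun p => (p.1, pvDedupe p.2)))).get? t = ((PySem.Dict.mk l).get? t).map pvDedupe := by
  induction l with
  | nil => simp [PySem.Dict.get?]
  | cons x rest ih =>
    obtain ⟨k, v⟩ := x
    simp only [List.map_cons]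
    rw [PySem.Dict.get?_mk_cons, PySem.Dict.get?_mk_cons]
    by_cases h : k == t
    · simp [h]
    · simp [h, ih]

theorem pvMapDedup_get? (d : PySem.Dict String (List (List (String × String)))) (t : String) :
    (pvMapDedup d).get? t = (d.get? t).map pvDedupe := by
  obtain ⟨l⟩ := d
  exact pvGet?_mk_map l t

theorem pvMapDedup_getD (d : PySem.Dict String (List (List (String × String)))) (t : String) :
    (pvMapDedup d).getD t [] = pvDedupe (d.getD t []) := by
  rw [PySem.Dict.getD_eq_get?_getD, PySem.Dict.getD_eq_get?_getD, pvMapDedup_get?]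
  cases d.get? t <;> simp [pvDedupe]

theorem pvMapDedup_contains (d : PySem.Dict String (List (List (String × String)))) (t : String) :
    (pvMapDedup d).contains t = d.contains t := by
  rw [PySem.Dict.contains_eq_isSome_get?, PySem.Dict.contains_eq_isSome_get?, pvMapDedup_get?]
  cases d.get? t <;> simp

theorem pvMapDedup_insert (d : PySem.Dict String (List (List (String × String)))) (t : String) (v : List (List (String × String))) :
    pvMapDedup (d.insert t v) = (pvMapDedup d).insert t (pvDedupe v) := by
  apply PySem.Dict.ext
  have h1 : (pvMapDedup (d.insert t v)).items = (d.insert t v).items.map (fun p => (p.1, pvDedupe p.2)) := rfl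
  have h2 : (pvMapDedup d).items = d.items.map (fun p => (p.1, pvDedupe p.2)) := rfl
  rw [h1, PySem.Dict.items_insert, PySem.Dict.items_insert, pvMapDedup_contains, h2]
  by_cases hc : d.contains t
  · simp only [hc, if_true, List.map_map]
    apply List.map_congr_left
    intro p _
    by_cases h : p.1 = t <;> simp [h]
  · simp only [hc, Bool.false_eq_true, if_false, List.map_append, List.map_cons, List.map_nil]

-- one table step: A's step on the deduped dict = dedup of B's collect step
theorem pvTable_step (out : PySem.Dict String (List (List (String × String)))) (p : String × List (List (String × String))) :
    pvTableA (pvMapDedup out) p = pvMapDedup (pvTableB out p) := by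
  by_cases h : p.1 = ""
  · simp [pvTableA, pvTableB, h]
  · simp only [pvTableA, pvTableB, h, if_false]
    rw [pvMapDedup_insert, pvMapDedup_getD, pvRowA_eq_pvRowB, pvDedupe_append]

theorem pvFold_src (src : List (String × List (List (String × String)))) (out : PySem.Dict String (List (List (String × String)))) :
    src.foldl pvTableA (pvMapDedup out) = pvMapDedup (src.foldl pvTableB out) := by
  induction src generalizing out with
  | nil => rfl
  | cons p ps ih => simp only [List.foldl_cons, pvTable_step, ih]

-- ===== VERDICT (by name: the statement is the Claim_ definition above) =====
theorem merge_rows_by_table_spec : Claim_equal_merge_rows_by_table := by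
  intro a b _
  unfold Spec_merge_rows_by_table merge_rows_by_table merge_rows_by_table_alt
  have hempty : pvMapDedup PySem.Dict.empty = PySem.Dict.empty := rfl
  simp only [List.foldl_cons, List.foldl_nil]
  rw [← hempty, pvFold_src, pvFold_src]
  rfl
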